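-- pv_equiv track=rewrite | github.com/gurfinkel/codeSignal | tournaments/stolenLunch/stolenLunch.py | stolenLunch
-- ===== SOURCE A (Python) =====
-- def stolenLunch(note):
--     newNote = []
--
--     for i in range(0, len(note)):
--         if '0' <= note[i] <= '9':
--             newNote.append(chr(int(note[i]) + ord('a')))
--         elif 'a' <= note[i] <= 'j':
--             newNote.append(str(ord(note[i]) - ord('a')))
--         else:
--             newNote.append(note[i])
--
--     return "".join(newNote)
-- ===== SOURCE B (Python) =====
-- _T = str.maketrans("0123456789abcdefghij", "abcdefghij0123456789")
--
--
-- def stolenLunch(note):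
--     return note.translate(_T)
-- ===== Notes on version B (the rewrite author's own statement) =====
-- stated objective: idiomatic
-- what changed: Replaced the explicit index loop with three conditional branches by a precomputed str.maketrans translation table applied in a single note.translate call with no loop or branch.
import Mathlib
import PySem

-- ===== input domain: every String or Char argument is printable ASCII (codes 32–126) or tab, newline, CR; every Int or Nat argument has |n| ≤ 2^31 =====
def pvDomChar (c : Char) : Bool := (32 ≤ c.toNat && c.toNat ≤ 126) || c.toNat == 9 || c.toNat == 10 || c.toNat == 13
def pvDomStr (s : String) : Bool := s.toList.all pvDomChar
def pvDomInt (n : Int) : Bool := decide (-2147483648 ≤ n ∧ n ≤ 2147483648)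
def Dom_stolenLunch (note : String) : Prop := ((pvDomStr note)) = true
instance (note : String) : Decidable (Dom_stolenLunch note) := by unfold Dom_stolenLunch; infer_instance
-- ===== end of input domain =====

-- B replaces A's per-character branch chain by a precomputed translation table applied in one pass (idiomatic; same cost).

-- ===== PORT A =====
-- A: index loop over the string; the loop body reads exactly the characters in order,
-- ported as a foldl over the character list accumulating the appended strings, then join.
def stolenLunch (note : String) : String :=
  String.mk (note.toList.foldl
    (fun newNote c =>
      newNote ++
        (if '0' ≤ c ∧ c ≤ '9' then
          [Char.ofNat ((((PySem.Int.ofChars? [c]).getD 0) + 97).toNat)]  -- chr(int(note[i]) + ord('a'))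
        else if 'a' ≤ c ∧ c ≤ 'j' then
          PySem.Int.toChars ((c.toNat : Int) - 97)                       -- str(ord(note[i]) - ord('a'))
        else [c]))
    [])

-- ===== PORT B =====
-- str.maketrans("0123456789abcdefghij", "abcdefghij0123456789") as a char→char association list.
def stolenLunchTable : List (Char × Char) :=
  List.zip "0123456789abcdefghij".toList "abcdefghij0123456789".toList

-- note.translate(_T): each character is replaced by its table entry, unmapped characters pass through.
def stolenLunch_alt (note : String) : String :=
  String.mk (note.toList.map (fun c => ((stolenLunchTable.lookup c).getD c)))

-- ===== PRECONDITION & SPEC =====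
def Spec_stolenLunch (note : String) (out : String) : Prop := out = stolenLunch_alt note
instance (note : String) (out : String) : Decidable (Spec_stolenLunch note out) := by unfold Spec_stolenLunch; infer_instance

-- ===== CLAIM (what is proved, stated in full; the proofs are below) =====
def Claim_equal_stolenLunch : Prop := ∀ (note : String), Dom_stolenLunch note → Spec_stolenLunch note (stolenLunch note)

-- ===== LEMMAS AND PROOFS =====

theorem pvCharEq_of_toNat (c : Char) (n : Nat) (h : c.toNat = n) : c = Char.ofNat n := by
  have h2 : Char.ofNat c.toNat = Char.ofNat n := by rw [h]
  rw [Char.ofNat_toNat] at h2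
  exact h2

theorem pvCharBetween (c lo hi : Char) :
    (lo ≤ c ∧ c ≤ hi) ↔ (lo.toNat ≤ c.toNat ∧ c.toNat ≤ hi.toNat) := by
  rw [Char.le_def, Char.le_def, UInt32.le_iff_toNat_le, UInt32.le_iff_toNat_le]
  exact Iff.rfl

theorem pvLookup_none (c : Char)
    (hb1 : ¬(48 ≤ c.toNat ∧ c.toNat ≤ 57)) (hb2 : ¬(97 ≤ c.toNat ∧ c.toNat ≤ 106)) :
    stolenLunchTable.lookup c = none := by
  have hne : ∀ d : Char,
      ((48 ≤ d.toNat ∧ d.toNat ≤ 57) ∨ (97 ≤ d.toNat ∧ d.toNat ≤ 106)) → (c == d) = false := by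
    intro d hd
    refine beq_eq_false_iff_ne.mpr (fun he => ?_)
    subst he
    rcases hd with ⟨a, b⟩ | ⟨a, b⟩ <;> omega
  simp [stolenLunchTable, List.lookup, hne '0' (by decide), hne '1' (by decide),
    hne '2' (by decide), hne '3' (by decide), hne '4' (by decide), hne '5' (by decide),
    hne '6' (by decide), hne '7' (by decide), hne '8' (by decide), hne '9' (by decide),
    hne 'a' (by decide), hne 'b' (by decide), hne 'c' (by decide), hne 'd' (by decide),
    hne 'e' (by decide), hne 'f' (by decide), hne 'g' (by decide), hne 'h' (by decide),
    hne 'i' (by decide), hne 'j' (by decide)]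

-- A's whole branch body equals B's single table lookup, on every character.
theorem pvCharStep (c : Char) :
    (if '0' ≤ c ∧ c ≤ '9' then
      [Char.ofNat ((((PySem.Int.ofChars? [c]).getD 0) + 97).toNat)]
    else if 'a' ≤ c ∧ c ≤ 'j' then
      PySem.Int.toChars ((c.toNat : Int) - 97)
    else [c]) = [(stolenLunchTable.lookup c).getD c] := by
  by_cases h1 : '0' ≤ c ∧ c ≤ '9'
  · have hb : 48 ≤ c.toNat ∧ c.toNat ≤ 57 := (pvCharBetween c '0' '9').mp h1
    have hc : c.toNat = 48 ∨ c.toNat = 49 ∨ c.toNat = 50 ∨ c.toNat = 51 ∨ c.toNat = 52 ∨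
        c.toNat = 53 ∨ c.toNat = 54 ∨ c.toNat = 55 ∨ c.toNat = 56 ∨ c.toNat = 57 := by
      omega
    rcases hc with h | h | h | h | h | h | h | h | h | h <;>
      rw [pvCharEq_of_toNat c _ h] <;> decide
  · by_cases h2 : 'a' ≤ c ∧ c ≤ 'j'
    · have hb : 97 ≤ c.toNat ∧ c.toNat ≤ 106 := (pvCharBetween c 'a' 'j').mp h2
      have hc : c.toNat = 97 ∨ c.toNat = 98 ∨ c.toNat = 99 ∨ c.toNat = 100 ∨ c.toNat = 101 ∨
          c.toNat = 102 ∨ c.toNat = 103 ∨ c.toNat = 104 ∨ c.toNat = 105 ∨ c.toNat = 106 := by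
        omega
      rcases hc with h | h | h | h | h | h | h | h | h | h <;>
        rw [pvCharEq_of_toNat c _ h] <;> decide
    · have hb1 : ¬(48 ≤ c.toNat ∧ c.toNat ≤ 57) := fun h => h1 ((pvCharBetween c '0' '9').mpr h)
      have hb2 : ¬(97 ≤ c.toNat ∧ c.toNat ≤ 106) := fun h => h2 ((pvCharBetween c 'a' 'j').mpr h)
      rw [if_neg h1, if_neg h2, pvLookup_none c hb1 hb2]
      rfl

-- ===== VERDICT (by name: the statement is the Claim_ definition above) =====
theorem stolenLunch_spec : Claim_equal_stolenLunch := by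
  intro note _
  unfold Spec_stolenLunch stolenLunch stolenLunch_alt
  congr 1
  rw [PySem.List.foldl_append_eq_flatMap]
  simp only [List.nil_append]
  induction note.toList with
  | nil => rfl
  | cons c cs ih => simp [List.flatMap_cons, pvCharStep c, ih]
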